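-- pv_equiv track=rewrite | github.com/2klips/lottery_analysis | src/analysis/feature_engine.py | _max_streaks
-- ===== SOURCE A (Python) =====
-- def _max_streaks(values: list[int]) -> dict[int, int]:
--     streaks = {digit: 0 for digit in range(10)}
--     current_value = -1
--     current_length = 0
--     for value in values:
--         current_length = current_length + 1 if value == current_value else 1
--         current_value = value
--         streaks[value] = max(streaks[value], current_length)
--     return streaks
-- ===== SOURCE B (Python) =====
-- def _max_streaks(values: list[int]) -> dict[int, int]:
--     streaks = {digit: 0 for digit in range(10)}
--     n = len(values)
--     i = 0
--     while i < n:
--         v = values[i]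
--         j = i + 1
--         while j < n and values[j] == v:
--             j += 1
--         streaks[v] = max(streaks[v], j - i)
--         i = j
--     return streaks
-- ===== Notes on version B (the rewrite author's own statement) =====
-- stated objective: alternative
-- what changed: B walks over maximal runs with two index pointers and records each run's length once, instead of A's per-element fold carrying a current_value/current_length counter across elements.
import Mathlib
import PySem

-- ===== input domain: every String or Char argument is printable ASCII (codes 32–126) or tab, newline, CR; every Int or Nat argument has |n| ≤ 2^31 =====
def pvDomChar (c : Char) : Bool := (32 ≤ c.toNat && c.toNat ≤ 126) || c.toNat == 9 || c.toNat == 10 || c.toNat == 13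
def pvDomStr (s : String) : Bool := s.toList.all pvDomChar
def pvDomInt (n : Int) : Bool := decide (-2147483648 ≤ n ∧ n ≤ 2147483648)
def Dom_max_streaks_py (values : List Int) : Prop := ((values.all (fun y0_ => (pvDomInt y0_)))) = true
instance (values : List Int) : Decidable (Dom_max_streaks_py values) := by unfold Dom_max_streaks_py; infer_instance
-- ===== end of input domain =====

-- B replaces A's per-element current_value/current_length fold by a two-pointer walk over maximal runs (alternative decomposition, same cost).


-- ===== PORT A =====
-- the {digit: 0 for digit in range(10)} initial dict (shared literal, used by both ports)
def streaksInit : PySem.Dict Int Int :=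
  (PySem.List.pyRange 0 10 1).foldl (fun d digit => d.insert digit 0) PySem.Dict.empty

-- one iteration of A's for-loop: state = (streaks, current_value, current_length)
-- streaks[value] read is KeyError outside Pre_; here getD 0 (exact inside Pre_, where the key exists)
def astep (s : PySem.Dict Int Int × Int × Int) (value : Int) :
    PySem.Dict Int Int × Int × Int :=
  let cl := if value = s.2.1 then s.2.2 + 1 else 1
  (s.1.insert value (max (s.1.getD value 0) cl), value, cl)

def max_streaks_py (values : List Int) : List (Int × Int) :=
  (values.foldl astep (streaksInit, -1, 0)).1.items

-- ===== PORT B =====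
-- inner while loop: length of the run of v at the front of the remaining list
def countRun (v : Int) : List Int → Nat
  | [] => 0
  | x :: xs => if x = v then 1 + countRun v xs else 0

-- outer while loop: one step per maximal run
def runsLoop (streaks : PySem.Dict Int Int) : List Int → PySem.Dict Int Int
  | [] => streaks
  | v :: rest =>
    let k := countRun v rest
    runsLoop (streaks.insert v (max (streaks.getD v 0) ((k : Int) + 1))) (rest.drop k)
  termination_by l => l.length
  decreasing_by simp

def max_streaks_py_alt (values : List Int) : List (Int × Int) :=
  (runsLoop streaksInit values).items

-- ===== PRECONDITION & SPEC =====
-- Pre_ excludes exactly the inputs with a value outside 0..9, on which Python A raises KeyError (B raises there too).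
def Pre_max_streaks_py (values : List Int) : Prop := ∀ v ∈ values, 0 ≤ v ∧ v < 10
instance (values : List Int) : Decidable (Pre_max_streaks_py values) := by
  unfold Pre_max_streaks_py; infer_instance
def pvWitness_max_streaks_py : List Int := [1, 1, 2, 0, 0, 0]

def Spec_max_streaks_py (values : List Int) (out : List (Int × Int)) : Prop := out = max_streaks_py_alt values
instance (values : List Int) (out : List (Int × Int)) : Decidable (Spec_max_streaks_py values out) := by unfold Spec_max_streaks_py; infer_instance

-- ===== CLAIM (what is proved, stated in full; the proofs are below) =====
def Claim_equal_max_streaks_py : Prop := ∀ (values : List Int), Dom_max_streaks_py values → Pre_max_streaks_py values → Spec_max_streaks_py values (max_streaks_py values)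

-- ===== LEMMAS AND PROOFS =====

theorem runsLoop_nil (d : PySem.Dict Int Int) : runsLoop d [] = d := by
  rw [runsLoop]

theorem runsLoop_cons (d : PySem.Dict Int Int) (v : Int) (rest : List Int) :
    runsLoop d (v :: rest)
      = runsLoop (d.insert v (max (d.getD v 0) ((countRun v rest : Int) + 1)))
          (rest.drop (countRun v rest)) := by
  rw [runsLoop]

-- run invariant: A's fold, started right after writing a run of length c of value v,
-- agrees with B's run-at-a-time loop
theorem astep_run (xs : List Int) : ∀ (v : Int) (d : PySem.Dict Int Int) (c : Int), 1 ≤ c →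
    (xs.foldl astep (d.insert v (max (d.getD v 0) c), v, c)).1
      = runsLoop (d.insert v (max (d.getD v 0) ((countRun v xs : Int) + c))) (xs.drop (countRun v xs)) := by
  induction xs with
  | nil => intro v d c _; simp [countRun, runsLoop_nil]
  | cons x xs ih =>
    intro v d c hc
    by_cases hxv : x = v
    · subst hxv
      have h1 : countRun x (x :: xs) = 1 + countRun x xs := by simp [countRun]
      have hstep : astep (d.insert x (max (d.getD x 0) c), x, c) x
          = (d.insert x (max (d.getD x 0) (c + 1)), x, c + 1) := by
        simp [astep, PySem.Dict.getD_insert_self, PySem.Dict.insert_insert_self]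
      rw [List.foldl_cons, hstep, h1]
      have := ih x d (c + 1) (by omega)
      rw [this]
      have harith : ((countRun x xs : Int) + (c + 1)) = (((1 + countRun x xs : Nat) : Int) + c) := by
        push_cast; ring
      rw [harith]
      rw [show (1 + countRun x xs) = countRun x xs + 1 from by omega, List.drop_succ_cons]
    · have h0 : countRun v (x :: xs) = 0 := by simp [countRun, hxv]
      rw [h0]
      have hstep : astep (d.insert v (max (d.getD v 0) c), v, c) x
          = ((d.insert v (max (d.getD v 0) c)).insert x
              (max ((d.insert v (max (d.getD v 0) c)).getD x 0) 1), x, 1) := by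
        simp [astep, hxv]
      rw [List.foldl_cons, hstep]
      have := ih x (d.insert v (max (d.getD v 0) c)) 1 (by omega)
      rw [this]
      simp only [Nat.cast_zero, zero_add, List.drop_zero]
      rw [runsLoop_cons]

theorem max_streaks_eq (values : List Int) : max_streaks_py values = max_streaks_py_alt values := by
  cases values with
  | nil => simp [max_streaks_py, max_streaks_py_alt, runsLoop_nil]
  | cons v rest =>
    unfold max_streaks_py max_streaks_py_alt
    have hstep : astep (streaksInit, -1, 0) v
        = (streaksInit.insert v (max (streaksInit.getD v 0) 1), v, 1) := by
      simp only [astep]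
      by_cases h : v = -1 <;> simp [h]
    rw [List.foldl_cons, hstep, astep_run rest v streaksInit 1 (by omega), runsLoop_cons]

-- ===== VERDICT (by name: the statement is the Claim_ definition above) =====
theorem max_streaks_py_spec : Claim_equal_max_streaks_py := by
  intro values _ _
  unfold Spec_max_streaks_py
  exact max_streaks_eq values
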